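-- pv_equiv track=rewrite | github.com/kimjh7669/SPA_algorithm | 완전탐색/모의고사_건호.py | solution
-- ===== SOURCE A (Python) =====
-- def solution(answers):
--     a = [1,2,3,4,5]
--     b = [2,1,2,3,2,4,2,5]
--     c = [3,3,1,1,2,2,4,4,5,5]
--     cnt_1, cnt_2, cnt_3 = 0,0,0
--     s = 0
--     for i in answers:
--         if a[s%5] == i:
--             cnt_1 +=1
--         if b[s%8] == i:
--             cnt_2 += 1
--         if c[s%10] == i:
--             cnt_3 += 1
--         s += 1
--     answer = [cnt_1, cnt_2, cnt_3]
--     m = max(answer)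
--     index = [i+1 for i, v in enumerate(answer) if v == m ]
--     return index
-- ===== SOURCE B (Python) =====
-- def solution(answers):
--     # 40 = lcm(5, 8, 10): whether answers[i] matches a pattern depends only on
--     # (i % 40, answers[i]), so a histogram of those pairs determines every count.
--     hist = {}
--     for i, x in enumerate(answers):
--         k = (i % 40, x)
--         hist[k] = hist.get(k, 0) + 1
--     pats = [[1, 2, 3, 4, 5], [2, 1, 2, 3, 2, 4, 2, 5], [3, 3, 1, 1, 2, 2, 4, 4, 5, 5]]
--     counts = [sum(hist.get((r, p[r % len(p)]), 0) for r in range(40)) for p in pats]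
--     m = max(counts)
--     return [i + 1 for i, v in enumerate(counts) if v == m]
-- ===== Notes on version B (the rewrite author's own statement) =====
-- stated objective: alternative
-- what changed: Instead of matching answers against the cyclic patterns, B builds a histogram dict keyed by (index mod 40, value) in one pass (40 = lcm of the pattern lengths) and obtains each pattern's count as a 40-term aggregation over the histogram; the pattern lists are never scanned against the answers.
import Mathlib
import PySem

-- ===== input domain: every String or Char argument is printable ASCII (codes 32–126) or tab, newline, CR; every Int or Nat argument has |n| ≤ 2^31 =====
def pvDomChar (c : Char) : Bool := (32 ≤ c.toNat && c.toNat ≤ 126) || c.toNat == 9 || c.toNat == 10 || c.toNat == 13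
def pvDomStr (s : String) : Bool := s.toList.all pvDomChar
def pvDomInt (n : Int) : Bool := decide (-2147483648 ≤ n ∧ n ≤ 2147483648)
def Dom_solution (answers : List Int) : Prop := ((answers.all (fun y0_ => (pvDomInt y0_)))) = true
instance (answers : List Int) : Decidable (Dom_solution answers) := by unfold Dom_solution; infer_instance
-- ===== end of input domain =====

-- B replaces A's pattern-matching scan by a histogram over (index mod 40, value) pairs
-- (40 = lcm of the pattern lengths) plus a 40-term aggregation per pattern (alternative
-- algorithm, same cost).

-- ===== PORT A =====
def solution (answers : List Int) : List Int :=
  let a : List Int := [1,2,3,4,5]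
  let b : List Int := [2,1,2,3,2,4,2,5]
  let c : List Int := [3,3,1,1,2,2,4,4,5,5]
  -- the for-loop over answers carrying (cnt_1, cnt_2, cnt_3, s); a[s%5] etc. are always
  -- in range, so pyGetD's default 0 is never used
  let st := answers.foldl
    (fun (st : Int × Int × Int × Int) i =>
      let (c1, c2, c3, s) := st
      let c1 := if PySem.List.pyGetD a (s % 5) 0 == i then c1 + 1 else c1
      let c2 := if PySem.List.pyGetD b (s % 8) 0 == i then c2 + 1 else c2
      let c3 := if PySem.List.pyGetD c (s % 10) 0 == i then c3 + 1 else c3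
      (c1, c2, c3, s + 1))
    (0, 0, 0, 0)
  let answer : List Int := [st.1, st.2.1, st.2.2.1]
  let m := (PySem.List.max? answer (fun y => y)).getD 0
  ((PySem.List.enumerate answer 0).filter (fun iv => iv.2 == m)).map (fun iv => iv.1 + 1)

-- ===== PORT B =====
def solution_alt (answers : List Int) : List Int :=
  -- hist[k] = hist.get(k, 0) + 1 over k = (i % 40, x)
  let hist : PySem.Dict (Int × Int) Int :=
    (PySem.List.enumerate answers 0).foldl
      (fun d ix =>
        let k := (ix.1 % 40, ix.2)
        d.insert k (d.getD k 0 + 1))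
      PySem.Dict.empty
  let pats : List (List Int) :=
    [[1,2,3,4,5], [2,1,2,3,2,4,2,5], [3,3,1,1,2,2,4,4,5,5]]
  -- sum(hist.get((r, p[r % len(p)]), 0) for r in range(40))
  let counts := pats.map (fun p =>
    ((PySem.List.pyRange 0 40 1).map
      (fun r => hist.getD (r, PySem.List.pyGetD p (r % (p.length : Int)) 0) 0)).sum)
  let m := (PySem.List.max? counts (fun v => v)).getD 0
  ((PySem.List.enumerate counts 0).filter (fun iv => iv.2 == m)).map (fun iv => iv.1 + 1)

-- ===== PRECONDITION & SPEC =====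
def Spec_solution (answers : List Int) (out : List Int) : Prop := out = solution_alt answers
instance (answers : List Int) (out : List Int) : Decidable (Spec_solution answers out) := by unfold Spec_solution; infer_instance

-- ===== CLAIM (what is proved, stated in full; the proofs are below) =====
def Claim_equal_solution : Prop := ∀ (answers : List Int), Dom_solution answers → Spec_solution answers (solution answers)

-- ===== LEMMAS AND PROOFS =====

-- number of matches of cyclic pattern p against l with running index s
def cnt (p : List Int) (s : Int) (l : List Int) : Int :=
  match l with
  | [] => 0
  | x :: xs => (if PySem.List.pyGetD p (s % (p.length : Int)) 0 == x then (1 : Int) else 0) + cnt p (s + 1) xs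

-- keyed pairs of B's histogram
def keyed (s : Int) (l : List Int) : List (Int × Int) :=
  (PySem.List.enumerate l s).map (fun ix => (ix.1 % 40, ix.2))

theorem keyed_cons (s : Int) (x : Int) (xs : List Int) :
    keyed s (x :: xs) = (s % 40, x) :: keyed (s + 1) xs := by
  simp [keyed, PySem.List.enumerate_cons]

theorem pair_beq (a b c d : Int) : (((a, b) == (c, d)) : Bool) = (a == c && b == d) := rfl

-- the 0/1 indicator sum over a nodup residue list picks out the single residue t
theorem indic_sum (R : List Int) (hnd : R.Nodup) (t x : Int) (ht : t ∈ R) (f : Int → Int) :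
    (R.map (fun r => if ((t, x) == (r, f r) : Bool) then (1 : Int) else 0)).sum
      = if f t == x then 1 else 0 := by
  induction R with
  | nil => cases ht
  | cons a R' ih =>
    rcases List.mem_cons.mp ht with h | h
    · subst h
      have hnotmem : t ∉ R' := (List.nodup_cons.mp hnd).1
      have htail : (R'.map (fun r => if ((t, x) == (r, f r) : Bool) then (1 : Int) else 0)).sum = 0 := by
        apply List.sum_eq_zero
        intro y hy
        rcases List.mem_map.mp hy with ⟨r, hr, hrf⟩
        have hrt : r ≠ t := fun hrt => hnotmem (hrt ▸ hr)
        simp only [← hrf, pair_beq]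
        have hf : (t == r) = false := beq_eq_false_iff_ne.mpr (Ne.symm hrt)
        simp [hf]
      simp only [List.map_cons, List.sum_cons, htail, add_zero]
      simp only [pair_beq, beq_iff_eq, beq_self_eq_true, Bool.true_and]
      by_cases hx : x = f t
      · rw [if_pos hx, if_pos hx.symm]
      · rw [if_neg hx, if_neg (fun h => hx h.symm)]
    · have hat : a ≠ t := by
        rintro rfl; exact (List.nodup_cons.mp hnd).1 h
      have hnd' : R'.Nodup := (List.nodup_cons.mp hnd).2
      simp only [List.map_cons, List.sum_cons, ih hnd' h]
      have hf : (t == a) = false := beq_eq_false_iff_ne.mpr (Ne.symm hat)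
      simp [pair_beq, hf]

-- B's 40-term histogram aggregation equals the direct cyclic match count
theorem hist_sum (p : List Int) (hdvd : (p.length : Int) ∣ 40) (l : List Int) (s : Int) :
    ((PySem.List.pyRange 0 40 1).map
      (fun r => (((keyed s l).count (r, PySem.List.pyGetD p (r % (p.length : Int)) 0) : Nat) : Int))).sum
      = cnt p s l := by
  induction l generalizing s with
  | nil =>
    simp [keyed, PySem.List.enumerate_nil, cnt, List.count_nil]
  | cons x xs ih =>
    have hmem : s % 40 ∈ PySem.List.pyRange 0 40 1 := by
      rw [PySem.List.mem_pyRange_one]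
      constructor
      · exact Int.emod_nonneg s (by norm_num)
      · exact Int.emod_lt_of_pos s (by norm_num)
    have hkey : PySem.List.pyGetD p ((s % 40) % (p.length : Int)) 0
        = PySem.List.pyGetD p (s % (p.length : Int)) 0 := by
      rw [Int.emod_emod_of_dvd s hdvd]
    calc ((PySem.List.pyRange 0 40 1).map
          (fun r => (((keyed s (x :: xs)).count (r, PySem.List.pyGetD p (r % (p.length : Int)) 0) : Nat) : Int))).sum
        = ((PySem.List.pyRange 0 40 1).map
          (fun r => (((keyed (s + 1) xs).count (r, PySem.List.pyGetD p (r % (p.length : Int)) 0) : Nat) : Int)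
            + (if ((((s % 40, x) : Int × Int) == (r, PySem.List.pyGetD p (r % (p.length : Int)) 0)) : Bool) then (1 : Int) else 0))).sum := by
          apply congrArg
          apply List.map_congr_left
          intro r _
          rw [keyed_cons, List.count_cons]
          push_cast
          rfl
      _ = ((PySem.List.pyRange 0 40 1).map
          (fun r => (((keyed (s + 1) xs).count (r, PySem.List.pyGetD p (r % (p.length : Int)) 0) : Nat) : Int))).sum
          + ((PySem.List.pyRange 0 40 1).map
          (fun r => if ((((s % 40, x) : Int × Int) == (r, PySem.List.pyGetD p (r % (p.length : Int)) 0)) : Bool) then (1 : Int) else 0)).sum := by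
          rw [← List.sum_map_add]
      _ = cnt p s (x :: xs) := by
          rw [ih, indic_sum _ (PySem.List.nodup_pyRange_one 0 40) _ _ hmem, hkey]
          simp only [cnt]
          ring

-- A's fused loop in terms of the three direct counts
theorem foldA (l : List Int) (c1 c2 c3 s : Int) :
    l.foldl
      (fun (st : Int × Int × Int × Int) i =>
        let (c1, c2, c3, s) := st
        let c1 := if PySem.List.pyGetD ([1,2,3,4,5] : List Int) (s % 5) 0 == i then c1 + 1 else c1
        let c2 := if PySem.List.pyGetD ([2,1,2,3,2,4,2,5] : List Int) (s % 8) 0 == i then c2 + 1 else c2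
        let c3 := if PySem.List.pyGetD ([3,3,1,1,2,2,4,4,5,5] : List Int) (s % 10) 0 == i then c3 + 1 else c3
        (c1, c2, c3, s + 1))
      (c1, c2, c3, s)
      = (c1 + cnt [1,2,3,4,5] s l,
         c2 + cnt [2,1,2,3,2,4,2,5] s l,
         c3 + cnt [3,3,1,1,2,2,4,4,5,5] s l,
         s + l.length) := by
  induction l generalizing c1 c2 c3 s with
  | nil => simp [cnt]
  | cons x xs ih =>
    simp only [List.foldl_cons, ih, cnt, List.length_cons]
    refine Prod.ext ?_ (Prod.ext ?_ (Prod.ext ?_ ?_)) <;> simp <;> omega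

-- B's histogram is the counter of the keyed pairs
theorem hist_eq_counter (answers : List Int) :
    (PySem.List.enumerate answers 0).foldl
      (fun (d : PySem.Dict (Int × Int) Int) ix =>
        let k := (ix.1 % 40, ix.2)
        d.insert k (d.getD k 0 + 1))
      PySem.Dict.empty
    = PySem.Dict.counter (keyed 0 answers) := by
  rw [keyed]
  conv_rhs => rw [← PySem.Dict.foldl_insert_getD_add_one_eq_counter, List.foldl_map]

theorem solution_spec : Claim_equal_solution := by
  intro answers _
  unfold Spec_solution solution solution_alt
  simp only [foldA, zero_add, hist_eq_counter, PySem.Dict.getD_counter]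
  simp only [List.map_cons, List.map_nil]
  rw [hist_sum [1,2,3,4,5] (by norm_num) answers 0,
      hist_sum [2,1,2,3,2,4,2,5] (by norm_num) answers 0,
      hist_sum [3,3,1,1,2,2,4,4,5,5] (by norm_num) answers 0]
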